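-- pv_equiv track=rewrite | github.com/FalveyLibraryTechnology/AMP-Database-Project | src/utils.py | isbn_checksum
-- ===== SOURCE A (Python) =====
-- def isbn_checksum(op):
--     digits = [int(c) for c in op]
--     sum = 0
--     for i in range(0, len(digits)):
--         if i % 2 == 0:
--             sum += digits[i]
--         else:
--             sum += 3 * digits[i]
--     #temp = str(10 - (sum % 10)) if ((10 - (sum % 10)) < 10) else '0'
--     mod = sum % 10
--     return str(10 - mod) if mod > 0 else '0'
-- ===== SOURCE B (Python) =====
-- def isbn_checksum(op):
--     all_sum = sum(int(c) for c in op)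
--     odd_sum = sum(int(c) for c in op[1::2])
--     return str(-(all_sum + 2 * odd_sum) % 10)
-- ===== Notes on version B (the rewrite author's own statement) =====
-- stated objective: alternative
-- what changed: B drops A's interleaved parity-branching loop entirely: using the weight identity 1*even+3*odd = all + 2*odd it sums ALL digits in one unweighted pass and the odd-position digits in a second pass over the slice op[1::2], combines them as all_sum + 2*odd_sum, and replaces A's guarded final branch by the closed form str(-total % 10).
import Mathlib
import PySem

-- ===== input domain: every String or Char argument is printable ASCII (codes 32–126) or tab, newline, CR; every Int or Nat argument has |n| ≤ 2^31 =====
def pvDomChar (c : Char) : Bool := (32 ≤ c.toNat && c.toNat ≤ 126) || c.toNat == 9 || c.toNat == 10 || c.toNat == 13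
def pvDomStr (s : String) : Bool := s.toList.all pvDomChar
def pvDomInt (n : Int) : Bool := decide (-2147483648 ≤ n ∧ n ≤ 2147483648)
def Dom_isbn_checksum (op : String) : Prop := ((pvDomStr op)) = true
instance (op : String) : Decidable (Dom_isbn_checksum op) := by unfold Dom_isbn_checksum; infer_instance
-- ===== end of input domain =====

-- B replaces A's interleaved parity-branching loop by two unbranched passes — the plain digit
-- sum of the whole string plus twice the digit sum of the slice op[1::2] (weight identity
-- 1*even + 3*odd = all + 2*odd) — and A's guarded final branch by str(-total % 10).
-- (objective: alternative decomposition, same cost)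

-- int(c) for one char; `none` (Python: ValueError) is unreachable under Pre_, `.getD 0` only extracts
def pvCharInt (c : Char) : Int := (PySem.Int.ofChars? [c]).getD 0

-- ===== PORT A =====
def isbn_checksum (op : String) : String :=
  let digits : List Int := op.toList.map pvCharInt
  let sum : Int :=
    (PySem.List.pyRange 0 (PySem.List.len digits)).foldl
      (fun s i =>
        if PySem.Int.mod i 2 = 0 then s + PySem.List.pyGetD digits i 0
        else s + 3 * PySem.List.pyGetD digits i 0) 0
  let mod := PySem.Int.mod sum 10
  if 0 < mod then PySem.Int.toStr (10 - mod) else "0"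

-- ===== PORT B =====
def isbn_checksum_alt (op : String) : String :=
  let all_sum : Int := (op.toList.map pvCharInt).sum
  -- op[1::2]: step-2 slicing never fails in Python; `.getD []` only extracts
  let odd_sum : Int :=
    (((PySem.List.slice? op.toList (some 1) none 2).getD []).map pvCharInt).sum
  PySem.Int.toStr (PySem.Int.mod (-(all_sum + 2 * odd_sum)) 10)

-- ===== PRECONDITION & SPEC =====
-- Pre_ excludes exactly the inputs where A raises: int(c) is a ValueError on any char that is
-- not a decimal digit (B then also reads a non-digit and would raise in Python).
def Pre_isbn_checksum (op : String) : Prop :=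
  op.toList.all PySem.Chars.isdigit = true
instance (op : String) : Decidable (Pre_isbn_checksum op) := by unfold Pre_isbn_checksum; infer_instance
def pvWitness_isbn_checksum : String := "9780306406157"

def Spec_isbn_checksum (op : String) (out : String) : Prop := out = isbn_checksum_alt op
instance (op : String) (out : String) : Decidable (Spec_isbn_checksum op out) := by unfold Spec_isbn_checksum; infer_instance

-- ===== CLAIM =====
def Claim_equal_isbn_checksum : Prop := ∀ (op : String), Dom_isbn_checksum op → Pre_isbn_checksum op → Spec_isbn_checksum op (isbn_checksum op)

-- ===== LEMMAS AND PROOFS =====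

-- elements of xs at odd positions, i.e. what xs[1::2] selects
def pvOddIdx {α : Type} : List α → List α
  | [] => []
  | [_] => []
  | _ :: b :: t => b :: pvOddIdx t

-- xs[1::2] is exactly pvOddIdx xs
theorem pvSlice_one_two {α : Type} (xs : List α) :
    PySem.List.slice? xs (some 1) none 2 = some (pvOddIdx xs) := by
  have key : ∀ (ys : List α),
      List.filterMap (fun k : Nat => ys[1 + 2*k]?) (List.range (ys.length/2)) = pvOddIdx ys := by
    intro ys
    induction ys using pvOddIdx.induct with
    | case1 => simp [pvOddIdx]
    | case2 a => simp [pvOddIdx]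
    | case3 a b t ih =>
      have hl : (a :: b :: t).length / 2 = t.length / 2 + 1 := by
        simp [List.length_cons]; omega
      rw [hl, List.range_succ_eq_map, List.filterMap_cons, List.filterMap_map]
      simp only [Nat.mul_zero, Nat.add_zero, List.getElem?_cons_succ, List.getElem?_cons_zero,
        Function.comp_def]
      have hf : (fun k : Nat => (a :: b :: t)[1 + 2*(k+1)]?) = fun k : Nat => t[1 + 2*k]? := by
        funext k
        have : 1 + 2*(k+1) = (1 + 2*k) + 1 + 1 := by omega
        rw [this, List.getElem?_cons_succ, List.getElem?_cons_succ]
      rw [hf, ih]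
      rfl
  unfold PySem.List.slice? PySem.List.sliceIndices
  simp only [if_neg (show ¬((2:Int) = 0) by decide)]
  simp only [show ¬((2:Int) < 0) from by decide, show ¬((1:Int) < 0) from by decide,
    show (0:Int) < 2 from by decide, if_true, if_false]
  rcases xs with _ | ⟨a, t⟩
  · simp [pvOddIdx]
  · have hlen : (1:Int) ≤ ((a :: t).length : Int) := by
      have : 1 ≤ (a :: t).length := by simp
      exact_mod_cast this
    have hmin : min (1:Int) ((a :: t).length : Int) = 1 := by omega
    rw [hmin]
    by_cases hlt : (1:Int) < ((a :: t).length : Int)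
    · rw [if_pos hlt]
      have hcnt : ((((a :: t).length : Int) - 1 + 2 - 1) / 2).toNat = (a :: t).length / 2 := by
        have : (((a :: t).length : Int) - 1 + 2 - 1) = ((a :: t).length : Int) := by ring
        rw [this]
        omega
      rw [hcnt]
      have hf : (fun x : Nat => (a :: t)[((1:Int) + 2 * ↑x).toNat]?)
          = fun x : Nat => (a :: t)[1 + 2*x]? := by
        funext x
        congr 1
      rw [hf, key]
    · rw [if_neg hlt]
      have ht : t = [] := by
        cases t with
        | nil => rfl
        | cons b t' =>
          exfalso
          have : ((a :: b :: t').length : Int) = (t'.length : Int) + 2 := by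
            push_cast [List.length_cons]; ring
          omega
      subst ht
      simp [pvOddIdx]

-- A's interleaved weighted sum equals the all-digits sum plus twice the odd-position sum.
theorem pvRangeSum_eq (cs : List Char) :
    ((List.range cs.length).map
        (fun (k : Nat) => if k % 2 = 0
                  then (cs.map pvCharInt).getD k 0
                  else 3 * (cs.map pvCharInt).getD k 0)).sum
      = (cs.map pvCharInt).sum + 2 * ((pvOddIdx cs).map pvCharInt).sum := by
  induction cs using pvOddIdx.induct with
  | case1 => simp [pvOddIdx]
  | case2 a => simp [pvOddIdx, List.range_succ]
  | case3 a b t ih =>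
    rw [show (a :: b :: t).length = t.length + 1 + 1 from rfl,
        List.range_succ_eq_map, List.range_succ_eq_map]
    have h2 : ∀ x : Nat, (x + 1 + 1) % 2 = x % 2 := fun x => by omega
    simp only [List.map_cons, List.map_map, List.sum_cons, Function.comp_def,
      Nat.succ_eq_add_one, h2, List.getD_cons_zero, List.getD_cons_succ]
    simp only [if_true]
    rw [if_neg (show ¬((0:Nat)+1) % 2 = 0 by decide), ih]
    simp [pvOddIdx]
    ring

-- pointwise bridge from A's Int-indexed body to the Nat-level summand above
theorem pvBody_natCast (d : List Int) (k : Nat) :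
    (if PySem.Int.mod (k : Int) 2 = 0
     then PySem.List.pyGetD d (k : Int) 0
     else 3 * PySem.List.pyGetD d (k : Int) 0)
      = (if k % 2 = 0 then d.getD k 0 else 3 * d.getD k 0) := by
  rw [PySem.List.pyGetD_natCast]
  have hm : PySem.Int.mod (k : Int) 2 = ((k % 2 : Nat) : Int) := by
    exact_mod_cast PySem.Int.mod_natCast k 2
  rw [hm]
  by_cases h : k % 2 = 0
  · simp [h]
  · have h' : ¬(((k % 2 : Nat) : Int) = 0) := by exact_mod_cast h
    rw [if_neg h', if_neg h]

-- A's guarded 10 - (sum % 10) branch is the closed form (-sum) % 10, rendered by str.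
theorem pvFinal_eq (S : Int) :
    (if 0 < PySem.Int.mod S 10 then PySem.Int.toStr (10 - PySem.Int.mod S 10) else "0")
      = PySem.Int.toStr (PySem.Int.mod (-S) 10) := by
  rw [PySem.Int.mod_eq_emod_of_pos (a := S) (show (0:Int) < 10 by omega),
      PySem.Int.mod_eq_emod_of_pos (a := -S) (show (0:Int) < 10 by omega)]
  by_cases h : 0 < S % 10
  · rw [if_pos h]
    congr 1
    omega
  · rw [if_neg h]
    have h0 : (-S) % 10 = 0 := by omega
    rw [h0]
    rfl

-- ===== VERDICT =====
theorem isbn_checksum_spec : Claim_equal_isbn_checksum := by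
  intro op _ _
  show isbn_checksum op = isbn_checksum_alt op
  simp only [isbn_checksum, isbn_checksum_alt, PySem.List.len, List.length_map,
    pvSlice_one_two, Option.getD_some]
  rw [PySem.List.pyRange_one]
  simp only [sub_zero, Int.toNat_natCast, List.foldl_map, zero_add]
  rw [show (fun (s : Int) (k : Nat) =>
        if PySem.Int.mod (k : Int) 2 = 0
        then s + PySem.List.pyGetD (op.toList.map pvCharInt) (k : Int) 0
        else s + 3 * PySem.List.pyGetD (op.toList.map pvCharInt) (k : Int) 0)
      = (fun (s : Int) (k : Nat) => s +
          (if k % 2 = 0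
           then (op.toList.map pvCharInt).getD k 0
           else 3 * (op.toList.map pvCharInt).getD k 0)) by
        funext s k
        rw [← pvBody_natCast]
        split <;> rfl]
  rw [PySem.List.foldl_add, pvRangeSum_eq, zero_add]
  exact pvFinal_eq _
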